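-- pv_equiv track=rewrite | github.com/renemoll/advent_of_code | 2024/days/day_19.py | is_design_possible
-- ===== SOURCE A (Python) =====
-- import functools
--
-- def is_design_possible(design: str, patterns: list[str]) -> bool:
--     @functools.cache
--     def is_possible(design) -> bool:
--         return (
--             1
--             if len(design) == 0
--             else sum(
--                 is_possible(design[len(p) :]) for p in patterns if design.startswith(p)
--             )
--         )
--
--     return is_possible(design)
-- ===== SOURCE B (Python) =====
-- def is_design_possible(design: str, patterns: list[str]) -> bool:
--     n = len(design)
--     dp = [0] * (n + 1)
--     dp[n] = 1
--     for i in range(n - 1, -1, -1):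
--         dp[i] = sum(dp[i + len(p)] for p in patterns if design.startswith(p, i))
--     return dp[0]
-- ===== Notes on version B (the rewrite author's own statement) =====
-- stated objective: alternative
-- what changed: Replaced the memoized top-down recursion (functools.cache over suffixes) with an explicit bottom-up DP array over positions, filled back to front with no recursion or cache.
import Mathlib
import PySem

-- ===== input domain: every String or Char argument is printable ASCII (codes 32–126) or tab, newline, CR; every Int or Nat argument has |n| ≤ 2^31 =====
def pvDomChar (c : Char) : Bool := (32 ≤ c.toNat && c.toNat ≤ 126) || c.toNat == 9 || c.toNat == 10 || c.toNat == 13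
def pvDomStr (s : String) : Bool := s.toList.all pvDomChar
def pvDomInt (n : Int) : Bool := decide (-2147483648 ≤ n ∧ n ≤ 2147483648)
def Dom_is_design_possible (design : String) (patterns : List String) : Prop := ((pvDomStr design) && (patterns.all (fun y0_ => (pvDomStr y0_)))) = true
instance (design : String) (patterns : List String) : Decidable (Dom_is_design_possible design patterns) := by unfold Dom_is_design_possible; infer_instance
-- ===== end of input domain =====

-- B replaces A's memoized top-down recursion with a bottom-up DP array over suffix positions (objective: alternative).


-- ===== PORT A =====
-- A's inner `is_possible`: plain recursion on the suffix (functools.cache is a pure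
-- optimisation and does not change the value).  Recursion is realised with fuel;
-- inside Pre_ every recursive call strictly shortens the suffix, so the fuel
-- `design.length + 1` is never exhausted (the fuel-out value 0 is unreachable there).
def isPossibleA (patterns : List String) : Nat → List Char → Int
  | 0, _ => 0
  | fuel + 1, d =>
      if d = [] then 1
      else
        -- sum(is_possible(design[len(p):]) for p in patterns if design.startswith(p))
        patterns.foldl
          (fun acc p =>
            if p.toList.isPrefixOf d then
              acc + isPossibleA patterns fuel (d.drop p.toList.length)
            else acc) 0

def is_design_possible (design : String) (patterns : List String) : Int :=
  isPossibleA patterns (design.toList.length + 1) design.toList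

-- ===== PORT B =====
-- dp[i + len(p)] read while dp[i] is being computed: for an empty pattern Python reads
-- the cell's initial 0, hence the k = 0 case below.
def dpRead (dp : List Int) (k : Nat) : Int :=
  if k = 0 then 0 else dp.getD (k - 1) 0

-- builds the dp list for a suffix d: element j is dp[i + j] of Source B's array,
-- constructed back to front exactly as the loop `for i in range(n-1, -1, -1)` does.
def dpB (patterns : List String) : List Char → List Int
  | [] => [1]
  | c :: rest =>
      let dp := dpB patterns rest
      (patterns.foldl
        (fun acc p =>
          if p.toList.isPrefixOf (c :: rest) then acc + dpRead dp p.toList.length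
          else acc) 0) :: dp

def is_design_possible_alt (design : String) (patterns : List String) : Int :=
  (dpB patterns design.toList).headD 0

-- ===== PRECONDITION & SPEC =====
-- Pre_ excludes exactly the inputs where A raises RecursionError: a nonempty design
-- together with the empty string among the patterns (design[0:] = design loops forever).
def Pre_is_design_possible (design : String) (patterns : List String) : Prop :=
  design.toList = [] ∨ "" ∉ patterns
instance (design : String) (patterns : List String) : Decidable (Pre_is_design_possible design patterns) := by unfold Pre_is_design_possible; infer_instance

def pvWitness_is_design_possible : String × List String := ("abc", ["a", "bc", "b", "c"])

def Spec_is_design_possible (design : String) (patterns : List String) (out : Int) : Prop := out = is_design_possible_alt design patterns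
instance (design : String) (patterns : List String) (out : Int) : Decidable (Spec_is_design_possible design patterns out) := by unfold Spec_is_design_possible; infer_instance

-- ===== CLAIM (what is proved, stated in full; the proofs are below) =====
def Claim_equal_is_design_possible : Prop := ∀ (design : String) (patterns : List String), Dom_is_design_possible design patterns → Pre_is_design_possible design patterns → Spec_is_design_possible design patterns (is_design_possible design patterns)

-- ===== LEMMAS AND PROOFS =====

-- element j of the dp list for d is the head of the dp list for d.drop j
theorem dpB_getD (patterns : List String) :
    ∀ (j : Nat) (d : List Char), j ≤ d.length →
      (dpB patterns d).getD j 0 = (dpB patterns (d.drop j)).headD 0 := by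
  intro j
  induction j with
  | zero =>
      intro d _
      cases d <;> simp [dpB]
  | succ j ih =>
      intro d hj
      cases d with
      | nil => simp at hj
      | cons c rest =>
          simp only [dpB, List.drop_succ_cons]
          rw [List.getD_cons_succ]
          exact ih rest (by simpa using hj)

-- main invariant: with no empty pattern and enough fuel, A's recursion computes
-- the head of B's dp list
theorem isPossibleA_eq_dpB (patterns : List String) (hne : "" ∉ patterns) :
    ∀ (fuel : Nat) (d : List Char), d.length ≤ fuel →
      isPossibleA patterns (fuel + 1) d = (dpB patterns d).headD 0 := by
  intro fuel
  induction fuel with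
  | zero =>
      intro d hd
      have hd0 : d = [] := List.eq_nil_of_length_eq_zero (Nat.le_zero.mp hd)
      subst hd0
      simp [isPossibleA, dpB]
  | succ n ih =>
      intro d hd
      cases d with
      | nil => simp [isPossibleA, dpB]
      | cons c rest =>
          show (if (c :: rest) = [] then (1 : Int) else
              patterns.foldl
                (fun acc p =>
                  if p.toList.isPrefixOf (c :: rest) then
                    acc + isPossibleA patterns (n + 1) ((c :: rest).drop p.toList.length)
                  else acc) 0) = _
          rw [if_neg (by simp)]
          simp only [dpB, List.headD_cons]
          -- the two folds agree term by term for every pattern in the list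
          refine PySem.List.foldl_congr_mem
            (f := fun (acc : Int) (p : String) =>
              if p.toList.isPrefixOf (c :: rest) then
                acc + isPossibleA patterns (n + 1) ((c :: rest).drop p.toList.length)
              else acc)
            (g := fun (acc : Int) (p : String) =>
              if p.toList.isPrefixOf (c :: rest) then
                acc + dpRead (dpB patterns rest) p.toList.length
              else acc) (l := patterns) (init := 0) ?_
          intro acc p hp
          dsimp only
          by_cases hpre : p.toList.isPrefixOf (c :: rest)
          · rw [if_pos hpre, if_pos hpre]
            -- p is a nonempty prefix: p.toList = q :: qs
            have hpne : p.toList ≠ [] := by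
              intro h0
              have hpeq : p = "" := by
                have := congrArg String.ofList h0
                simpa using this
              exact hne (hpeq ▸ hp)
            obtain ⟨q, qs, hq⟩ := List.exists_cons_of_ne_nil hpne
            have hlen : p.toList.length = qs.length + 1 := by rw [hq]; simp
            have hplen : p.toList.length ≤ rest.length + 1 :=
              by simpa using (List.IsPrefix.length_le (List.isPrefixOf_iff_prefix.mp hpre))
            have hqs : qs.length ≤ rest.length := by omega
            have hdrop : (c :: rest).drop p.toList.length = rest.drop qs.length := by
              rw [hlen]; simp
            have hrec : isPossibleA patterns (n + 1) ((c :: rest).drop p.toList.length)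
                = (dpB patterns ((c :: rest).drop p.toList.length)).headD 0 := by
              apply ih
              rw [hdrop]
              have hr : rest.length ≤ n := by simpa using hd
              have : (rest.drop qs.length).length = rest.length - qs.length := by simp
              omega
            rw [hrec, hdrop]
            unfold dpRead
            rw [if_neg (by omega), hlen]
            simp only [Nat.add_sub_cancel]
            rw [dpB_getD patterns qs.length rest hqs]
          · rw [if_neg hpre, if_neg hpre]

-- ===== VERDICT (by name: the statement is the Claim_ definition above) =====
theorem is_design_possible_spec : Claim_equal_is_design_possible := by
  intro design patterns _ hpre
  unfold Spec_is_design_possible is_design_possible is_design_possible_alt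
  rcases hpre with h0 | hne
  · rw [h0]; simp [isPossibleA, dpB]
  · exact isPossibleA_eq_dpB patterns hne design.toList.length design.toList le_rfl
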